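-- pv_equiv track=rewrite | github.com/cleslin1/public_teaching_data | Modules/module05/kmers/triple_nested_for_loop_alternative.py | trinucleotides_v1
-- ===== SOURCE A (Python) =====
-- def trinucleotides_v1(alphabet='AGCT'):
--     """
--     Count the trinucleotides in a string
--     @param alphabet: What alphabet to use
--     @return: Dict of trinucleotides
--     """
--     counts = {}
--     for base1 in alphabet:
--         for base2 in alphabet:
--             for base3 in alphabet:
--                 trinucleotide = base1 + base2 + base3
--                 counts[trinucleotide] = 1
--     return counts
-- ===== SOURCE B (Python) =====
-- def trinucleotides_v1(alphabet='AGCT'):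
--     """Build the trinucleotides by iterative prefix extension (3 rounds) instead of three nested loops."""
--     prefixes = ['']
--     for _ in range(3):
--         prefixes = [p + b for p in prefixes for b in alphabet]
--     return {kmer: 1 for kmer in prefixes}
-- ===== Notes on version B (the rewrite author's own statement) =====
-- stated objective: alternative
-- what changed: Replaces the three nested for-loops with iterative prefix extension: starting from [''], three rounds of extending every prefix by every alphabet letter, then a dict comprehension over the resulting kmer list.
import Mathlib
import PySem

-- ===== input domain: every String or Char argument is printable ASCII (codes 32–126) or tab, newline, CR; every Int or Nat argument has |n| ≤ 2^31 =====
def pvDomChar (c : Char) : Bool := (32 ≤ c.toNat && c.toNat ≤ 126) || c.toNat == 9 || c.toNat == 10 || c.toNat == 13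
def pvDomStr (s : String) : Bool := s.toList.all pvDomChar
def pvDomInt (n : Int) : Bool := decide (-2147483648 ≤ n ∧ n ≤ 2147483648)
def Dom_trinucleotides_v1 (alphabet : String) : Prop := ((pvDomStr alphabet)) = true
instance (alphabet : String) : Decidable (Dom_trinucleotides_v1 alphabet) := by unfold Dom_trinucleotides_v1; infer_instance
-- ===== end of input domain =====

-- B replaces the three nested loops with three rounds of prefix extension over a growing list; same output, alternative decomposition.

-- ===== PORT A =====
-- counts = {}; triple nested loop over alphabet; counts[b1+b2+b3] = 1
def trinucleotides_v1 (alphabet : String) : List (String × Int) :=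
  (alphabet.toList.foldl (fun d1 base1 =>
    alphabet.toList.foldl (fun d2 base2 =>
      alphabet.toList.foldl (fun d3 base3 =>
        d3.insert (base1.toString ++ base2.toString ++ base3.toString) 1) d2) d1)
    (PySem.Dict.empty : PySem.Dict String Int)).items

-- ===== PORT B =====
-- prefixes = ['']; three rounds of prefixes = [p + b for p in prefixes for b in alphabet]; then {kmer: 1 for kmer in prefixes}
def pvExtend (l : List Char) (ps : List String) : List String :=
  ps.flatMap (fun p => l.map (fun b => p ++ b.toString))

def trinucleotides_v1_alt (alphabet : String) : List (String × Int) :=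
  ((pvExtend alphabet.toList (pvExtend alphabet.toList (pvExtend alphabet.toList [""]))).foldl (fun d kmer => d.insert kmer 1) (PySem.Dict.empty : PySem.Dict String Int)).items

-- ===== PRECONDITION & SPEC =====
def Spec_trinucleotides_v1 (alphabet : String) (out : List (String × Int)) : Prop := out = trinucleotides_v1_alt alphabet
instance (alphabet : String) (out : List (String × Int)) : Decidable (Spec_trinucleotides_v1 alphabet out) := by unfold Spec_trinucleotides_v1; infer_instance

-- ===== CLAIM (what is proved, stated in full; the proofs are below) =====
def Claim_equal_trinucleotides_v1 : Prop := ∀ (alphabet : String), Dom_trinucleotides_v1 alphabet → Spec_trinucleotides_v1 alphabet (trinucleotides_v1 alphabet)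

-- ===== LEMMAS AND PROOFS =====

-- folding a function over a flatMap is the nested fold
theorem pv_foldl_flatMap {α β γ : Type} (f : γ → β → γ) (g : α → List β) (l : List α) (init : γ) :
    (l.flatMap g).foldl f init = l.foldl (fun acc x => (g x).foldl f acc) init := by
  induction l generalizing init with
  | nil => rfl
  | cons a t ih => simp [List.flatMap_cons, List.foldl_append, ih]

-- the three-round prefix extension produces exactly A's nested kmer list
theorem pv_extend3 (l : List Char) :
    pvExtend l (pvExtend l (pvExtend l [""])) =
      l.flatMap (fun b1 => l.flatMap (fun b2 => l.map (fun b3 =>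
        b1.toString ++ b2.toString ++ b3.toString))) := by
  simp [pvExtend, List.flatMap_cons, List.flatMap_map, List.flatMap_assoc, String.singleton]

-- two folds with pointwise-equal step functions agree
theorem pv_foldl_ext {α β : Type} (f g : β → α → β) (l : List α)
    (h : ∀ b a, f b a = g b a) (init : β) : l.foldl f init = l.foldl g init := by
  induction l generalizing init with
  | nil => rfl
  | cons a t ih => simp only [List.foldl_cons, h, ih]

-- ===== VERDICT (by name: the statement is the Claim_ definition above) =====
theorem trinucleotides_v1_spec : Claim_equal_trinucleotides_v1 := by
  intro alphabet _
  unfold Spec_trinucleotides_v1 trinucleotides_v1 trinucleotides_v1_alt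
  rw [pv_extend3, pv_foldl_flatMap]
  congr 1
  apply pv_foldl_ext
  intro d b1
  rw [pv_foldl_flatMap]
  apply pv_foldl_ext
  intro d2 b2
  rw [List.foldl_map]
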